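-- pv_equiv track=rewrite | github.com/pypi-data/pypi-mirror-401 | packages/inceptbench/inceptbench-2.3.0-py3-none-any.whl/inceptbench/core/utils/json_repair.py | _balance_brackets_and_quotes
-- ===== SOURCE A (Python) =====
-- def _balance_brackets_and_quotes(s: str) -> str:
--     """
--     Add missing closing } or ] and close an open string if needed.
--     """
--     open_braces = s.count("{")
--     close_braces = s.count("}")
--     open_brackets = s.count("[")
--     close_brackets = s.count("]")
--
--     # Close unterminated string if any
--     in_str = False
--     esc = False
--     for ch in s:
--         if in_str:
--             if esc:
--                 esc = False
--             elif ch == "\\":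
--                 esc = True
--             elif ch == '"':
--                 in_str = False
--             continue
--         if ch == '"':
--             in_str = True
--     if in_str:
--         s += '"'
--
--     if open_braces > close_braces:
--         s += "}" * (open_braces - close_braces)
--     if open_brackets > close_brackets:
--         s += "]" * (open_brackets - close_brackets)
--     return s
-- ===== SOURCE B (Python) =====
-- def _balance_brackets_and_quotes(s: str) -> str:
--     """Derive the open-string state from s.split('"') segments by trailing-backslash
--     parity instead of a character-by-character escape state machine."""
--     parts = s.split('"')
--     in_str = False
--     for seg in parts[:-1]:
--         if not in_str:
--             in_str = True
--         elif (len(seg) - len(seg.rstrip('\\'))) % 2 == 0: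
--             in_str = False
--     return (s + ('"' if in_str else '')
--             + '}' * max(0, s.count('{') - s.count('}'))
--             + ']' * max(0, s.count('[') - s.count(']')))
-- ===== Notes on version B (the rewrite author's own statement) =====
-- stated objective: alternative
-- what changed: A runs a character-by-character in-string/escape state machine plus guarded appends; B has no character-level scan at all: it splits the input on the double-quote character and folds the open-string state over the resulting segments, deciding whether each quote closes the string by the parity of the segment's trailing backslash run (via rstrip), then appends the closers unconditionally via max(0, opens - closes).
import Mathlib
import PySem

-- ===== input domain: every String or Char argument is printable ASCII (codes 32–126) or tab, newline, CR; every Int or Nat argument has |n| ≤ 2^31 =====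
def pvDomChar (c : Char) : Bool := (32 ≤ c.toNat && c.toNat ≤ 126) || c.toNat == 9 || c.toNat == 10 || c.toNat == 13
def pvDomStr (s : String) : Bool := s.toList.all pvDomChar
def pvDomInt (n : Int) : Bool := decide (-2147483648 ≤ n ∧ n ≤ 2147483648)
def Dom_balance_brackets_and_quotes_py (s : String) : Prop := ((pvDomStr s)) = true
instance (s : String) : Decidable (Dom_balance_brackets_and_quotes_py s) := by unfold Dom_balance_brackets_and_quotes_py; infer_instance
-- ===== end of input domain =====

-- B derives the open-string state from the segments of s.split('"') by trailing-backslash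
-- parity instead of A's character-by-character escape state machine (objective: alternative).

-- ===== PORT A =====
-- "x" * n (n ≥ 0 by the guard) is ported exactly as String.ofList (List.replicate n 'x').
def balance_brackets_and_quotes_py (s : String) : String :=
  let open_braces := PySem.Str.count s "{"
  let close_braces := PySem.Str.count s "}"
  let open_brackets := PySem.Str.count s "["
  let close_brackets := PySem.Str.count s "]"
  let st := s.toList.foldl (fun (p : Bool × Bool) ch =>
      if p.1 then
        if p.2 then (p.1, false)
        else if ch == '\\' then (p.1, true)
        else if ch == '"' then (false, p.2)
        else p
      else if ch == '"' then (true, p.2) else p) (false, false)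
  let s1 := if st.1 then s ++ "\"" else s
  let s2 := if open_braces > close_braces then
      s1 ++ String.ofList (List.replicate (open_braces - close_braces) '}') else s1
  if open_brackets > close_brackets then
      s2 ++ String.ofList (List.replicate (open_brackets - close_brackets) ']') else s2

-- ===== PORT B =====
-- hand port of len(seg) - len(seg.rstrip('\\')) (rstrip with an explicit char set is not in
-- PySem; dropping the trailing run of '\\' from the reversed list is exact for that call).
def bbqTrail (seg : List Char) : Nat :=
  seg.length - ((seg.reverse.dropWhile (fun c => c == '\\')).reverse).length

-- s.split('"') → PySem.Chars.splitOn (the list-of-chars form of PySem.Str.split?);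
-- parts[:-1] → List.dropLast; '}' * max(0, k) → String.ofList (List.replicate k.toNat '}').
def balance_brackets_and_quotes_py_alt (s : String) : String :=
  let parts := PySem.Chars.splitOn s.toList ['"']
  let in_str := parts.dropLast.foldl (fun b seg =>
      if !b then true
      else if bbqTrail seg % 2 == 0 then false
      else true) false
  s ++ (if in_str then "\"" else "")
    ++ String.ofList (List.replicate (max 0 ((PySem.Str.count s "{" : Int) - PySem.Str.count s "}")).toNat '}')
    ++ String.ofList (List.replicate (max 0 ((PySem.Str.count s "[" : Int) - PySem.Str.count s "]")).toNat ']')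

-- ===== PRECONDITION & SPEC =====
def Spec_balance_brackets_and_quotes_py (s : String) (out : String) : Prop := out = balance_brackets_and_quotes_py_alt s
instance (s : String) (out : String) : Decidable (Spec_balance_brackets_and_quotes_py s out) := by unfold Spec_balance_brackets_and_quotes_py; infer_instance

-- ===== CLAIM (what is proved, stated in full; the proofs are below) =====
def Claim_equal_balance_brackets_and_quotes_py : Prop := ∀ (s : String), Dom_balance_brackets_and_quotes_py s → Spec_balance_brackets_and_quotes_py s (balance_brackets_and_quotes_py s)

-- ===== LEMMAS AND PROOFS =====

theorem count_go_singleton (c : Char) : ∀ (fuel : Nat) (l : List Char) (acc : Nat), l.length ≤ fuel →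
    PySem.Chars.count.go [c] fuel l acc = acc + l.count c := by
  intro fuel
  induction fuel with
  | zero =>
    intro l acc h
    cases l with
    | nil => simp [PySem.Chars.count.go]
    | cons a t => simp at h
  | succ n ih =>
    intro l acc h
    cases l with
    | nil => simp [PySem.Chars.count.go]
    | cons a t =>
      rw [PySem.Chars.count.go]
      by_cases hc : a = c
      · simp [hc, List.isPrefixOf, ih t (acc + 1) (by simpa using h)]
        omega
      · simp [List.isPrefixOf, hc, ih t acc (by simpa using h), Ne.symm hc]

theorem count_singleton (s : List Char) (c : Char) : PySem.Chars.count s [c] = s.count c := by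
  simp [PySem.Chars.count, count_go_singleton c s.length s 0 le_rfl]

-- reference form of split-on-'"' with an explicit current-segment accumulator
def splitQ : List Char → List Char → List (List Char)
  | pre, [] => [pre]
  | pre, c :: t => if c = '"' then pre :: splitQ [] t else splitQ (pre ++ [c]) t

theorem splitQ_ne_nil : ∀ (l pre : List Char), splitQ pre l ≠ [] := by
  intro l
  induction l with
  | nil => intro pre; simp [splitQ]
  | cons c t ih =>
    intro pre
    by_cases hc : c = '"' <;> simp [splitQ, hc, ih]

theorem splitOn_go_eq : ∀ (l : List Char) (fuel : Nat) (cur : List Char) (acc : List (List Char)),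
    l.length ≤ fuel →
    PySem.Chars.splitOn.go ['"'] fuel l cur acc = acc.reverse ++ splitQ cur.reverse l := by
  intro l
  induction l with
  | nil =>
    intro fuel cur acc _
    cases fuel <;> simp [PySem.Chars.splitOn.go, splitQ]
  | cons c t ih =>
    intro fuel cur acc h
    cases fuel with
    | zero => simp at h
    | succ f =>
      rw [PySem.Chars.splitOn.go]
      by_cases hc : c = '"'
      · simp [hc, List.isPrefixOf, ih f [] (cur.reverse :: acc) (by simpa using h), splitQ]
      · simp [List.isPrefixOf, hc, Ne.symm hc, ih f (c :: cur) acc (by simpa using h), splitQ]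

theorem splitOn_eq_splitQ (l : List Char) :
    PySem.Chars.splitOn l ['"'] = splitQ [] l := by
  show PySem.Chars.splitOn.go ['"'] (l.length + 1) l [] [] = splitQ [] l
  simpa using splitOn_go_eq l (l.length + 1) [] [] (by omega)

theorem bbqTrail_eq (seg : List Char) :
    bbqTrail seg = (seg.reverse.takeWhile (fun c => c == '\\')).length := by
  unfold bbqTrail
  have h := congrArg List.length (List.takeWhile_append_dropWhile (p := fun c => c == '\\') (l := seg.reverse))
  simp only [List.length_append, List.length_reverse] at h ⊢
  omega

theorem bbqTrail_nil : bbqTrail [] = 0 := by decide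

theorem bbqTrail_append (pre : List Char) (c : Char) :
    bbqTrail (pre ++ [c]) = if c = '\\' then bbqTrail pre + 1 else 0 := by
  by_cases hc : c = '\\' <;>
    simp [bbqTrail_eq, hc]

-- abbreviation for the escape flag carried by A inside a string whose body so far is `pre`
def oddB (pre : List Char) : Bool := bbqTrail pre % 2 == 1

-- the heart of the proof: A's character machine agrees with B's fold over the split segments
theorem main_fold : ∀ (l pre : List Char) (b : Bool),
    (l.foldl (fun (p : Bool × Bool) ch =>
      if p.1 then
        if p.2 then (p.1, false)
        else if ch == '\\' then (p.1, true)
        else if ch == '"' then (false, p.2)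
        else p
      else if ch == '"' then (true, p.2) else p) (b, b && oddB pre)).1
    = ((splitQ pre l).dropLast).foldl (fun b seg =>
      if !b then true
      else if bbqTrail seg % 2 == 0 then false
      else true) b := by
  intro l
  induction l with
  | nil => intro pre b; simp [splitQ]
  | cons c t ih =>
    intro pre b
    by_cases hc : c = '"'
    · subst hc
      have hsq : splitQ pre ('"' :: t) = pre :: splitQ [] t := by simp [splitQ]
      rw [hsq, List.dropLast_cons_of_ne_nil (splitQ_ne_nil t [])]
      dsimp only [List.foldl_cons]
      cases b with
      | false =>
        have h2 := ih [] true
        simpa [oddB, bbqTrail_nil] using h2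
      | true =>
        by_cases hp : bbqTrail pre % 2 = 1
        · have hp0 : ¬ (bbqTrail pre % 2 = 0) := by omega
          have h2 := ih [] true
          simpa [oddB, bbqTrail_nil, hp, hp0] using h2
        · have hp0 : bbqTrail pre % 2 = 0 := by omega
          have h2 := ih [] false
          simpa [oddB, bbqTrail_nil, hp0] using h2
    · have hsq : splitQ pre (c :: t) = splitQ (pre ++ [c]) t := by simp [splitQ, hc]
      rw [hsq]
      dsimp only [List.foldl_cons]
      cases b with
      | false =>
        have h2 := ih (pre ++ [c]) false
        simpa [hc] using h2
      | true =>
        by_cases hb : c = '\\'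
        · subst hb
          by_cases hp : bbqTrail pre % 2 = 1
          · have h1 : (bbqTrail pre + 1) % 2 = 0 := by omega
            have hp0 : ¬ (bbqTrail pre % 2 = 0) := by omega
            have h2 := ih (pre ++ ['\\']) true
            simpa [oddB, bbqTrail_append, hp, hp0, h1] using h2
          · have h1 : (bbqTrail pre + 1) % 2 = 1 := by omega
            have hp0 : bbqTrail pre % 2 = 0 := by omega
            have h2 := ih (pre ++ ['\\']) true
            simpa [oddB, bbqTrail_append, hp0, h1] using h2
        · by_cases hp : bbqTrail pre % 2 = 1
          · have hp0 : ¬ (bbqTrail pre % 2 = 0) := by omega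
            have h2 := ih (pre ++ [c]) true
            simpa [oddB, bbqTrail_append, hb, hc, hp, hp0] using h2
          · have hp0 : bbqTrail pre % 2 = 0 := by omega
            have h2 := ih (pre ++ [c]) true
            simpa [oddB, bbqTrail_append, hb, hc, hp0] using h2

theorem replicate_max_eq (o c : Nat) (ch : Char) :
    String.ofList (List.replicate ((max 0 ((o : Int) - c)).toNat) ch)
      = if c < o then String.ofList (List.replicate (o - c) ch) else "" := by
  have h : ((max 0 ((o : Int) - c)).toNat) = o - c := by omega
  rw [h]
  split_ifs with hlt
  · rfl
  · have h0 : o - c = 0 := by omega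
    rw [h0, List.replicate_zero]

theorem ite_append (P : Prop) [Decidable P] (a x : String) :
    (if P then a ++ x else a) = a ++ (if P then x else "") := by
  split_ifs <;> simp

-- ===== VERDICT (by name: the statement is the Claim_ definition above) =====
theorem balance_brackets_and_quotes_py_spec : Claim_equal_balance_brackets_and_quotes_py := by
  intro s _
  unfold Spec_balance_brackets_and_quotes_py balance_brackets_and_quotes_py balance_brackets_and_quotes_py_alt
  dsimp only
  have hin : (s.toList.foldl (fun (p : Bool × Bool) ch =>
      if p.1 then
        if p.2 then (p.1, false)
        else if ch == '\\' then (p.1, true)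
        else if ch == '"' then (false, p.2)
        else p
      else if ch == '"' then (true, p.2) else p) (false, false)).1
      = ((splitQ [] s.toList).dropLast).foldl (fun b seg =>
        if !b then true
        else if bbqTrail seg % 2 == 0 then false
        else true) false := by
    have h := main_fold s.toList [] false
    simpa using h
  rw [splitOn_eq_splitQ, ← hin, replicate_max_eq, replicate_max_eq, ite_append, ite_append]
  have e1 : PySem.Str.count s "{" = s.toList.count '{' := by
    rw [PySem.Str.count_eq]; exact count_singleton _ _
  have e2 : PySem.Str.count s "}" = s.toList.count '}' := by
    rw [PySem.Str.count_eq]; exact count_singleton _ _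
  have e3 : PySem.Str.count s "[" = s.toList.count '[' := by
    rw [PySem.Str.count_eq]; exact count_singleton _ _
  have e4 : PySem.Str.count s "]" = s.toList.count ']' := by
    rw [PySem.Str.count_eq]; exact count_singleton _ _
  simp only [e1, e2, e3, e4]
  split_ifs <;> simp [String.append_assoc]
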